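-- pv_equiv track=rewrite | github.com/724thomas/CodingChallenge_Python | baekjoon/5547.py | solution
-- ===== SOURCE A (Python) =====
-- from collections import deque
--
-- def solution(w, h, houses):
--     dir_even_idx = ((-1, 0), (-1, 1), (0, -1), (0, +1), (1, 0), (1, 1))
--     dir_odd_idx = ((-1, -1), (-1, 0), (0, -1), (0, +1), (1, -1), (1, 0))
--     dir_idx = {0: dir_odd_idx, 1: dir_even_idx}
--
--     counter = 0
--     visited = set()
--     visited.add((0, 0))
--     queue = deque()
--     queue.append((0, 0))
--
--     while queue:
--         x1, y1 = queue.popleft()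
--
--         for x2, y2 in dir_idx[x1 % 2]:
--             x, y = x1 + x2, y1 + y2
--             if x < 0 or x >= h or y < 0 or y >= w:
--                 continue
--
--             if houses[x][y] == 1:
--                 counter += 1
--             if (x, y) in visited or houses[x][y] == 1:
--                 continue
--             visited.add((x, y))
--             queue.append((x, y))
--     return counter
-- ===== SOURCE B (Python) =====
-- def solution(w, h, houses):
--     dir_even = ((-1, 0), (-1, 1), (0, -1), (0, 1), (1, 0), (1, 1))
--     dir_odd = ((-1, -1), (-1, 0), (0, -1), (0, 1), (1, -1), (1, 0))
--
--     def dirs_for(x):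
--         return dir_even if x % 2 == 1 else dir_odd
--
--     if h <= 0 or w <= 0:
--         return 0  # empty rectangle: nothing in bounds, no adjacent houses
--
--     # Label propagation (Gauss-Seidel fixpoint): no queue/worklist; sweep the whole
--     # rectangle repeatedly, spreading reachability from already-reached cells, until
--     # a full sweep changes nothing.
--     reach = {(0, 0)}
--     changed = True
--     while changed:
--         changed = False
--         for x in range(h):
--             for y in range(w):
--                 if (x, y) in reach:
--                     for dx, dy in dirs_for(x):
--                         nx, ny = x + dx, y + dy
--                         if 0 <= nx < h and 0 <= ny < w and houses[nx][ny] != 1 \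
--                                 and (nx, ny) not in reach:
--                             reach.add((nx, ny))
--                             changed = True
--
--     # Sum, over the reachable region, the in-bounds house neighbours of each cell.
--     return sum(1
--                for cx, cy in reach
--                for dx, dy in dirs_for(cx)
--                if 0 <= cx + dx < h and 0 <= cy + dy < w and houses[cx + dx][cy + dy] == 1)
-- ===== Notes on version B (the rewrite author's own statement) =====
-- stated objective: alternative
-- what changed: A's worklist BFS (deque + visited set, counting while flooding) is replaced by a queue-free Gauss-Seidel label-propagation fixpoint: repeated full-rectangle sweeps spread reachability from already-reached cells until a sweep changes nothing, then a separate pass sums the in-bounds house neighbours of the reached region.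
-- outside the precondition, e.g. on solution(1, 1000000007, [[0], [1, 1310]]): A returns 1, B does not finish within the time limit; on solution(2, 3, [[1, 1], [1, 1]]): A returns 2, B returns 2
import Mathlib
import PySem

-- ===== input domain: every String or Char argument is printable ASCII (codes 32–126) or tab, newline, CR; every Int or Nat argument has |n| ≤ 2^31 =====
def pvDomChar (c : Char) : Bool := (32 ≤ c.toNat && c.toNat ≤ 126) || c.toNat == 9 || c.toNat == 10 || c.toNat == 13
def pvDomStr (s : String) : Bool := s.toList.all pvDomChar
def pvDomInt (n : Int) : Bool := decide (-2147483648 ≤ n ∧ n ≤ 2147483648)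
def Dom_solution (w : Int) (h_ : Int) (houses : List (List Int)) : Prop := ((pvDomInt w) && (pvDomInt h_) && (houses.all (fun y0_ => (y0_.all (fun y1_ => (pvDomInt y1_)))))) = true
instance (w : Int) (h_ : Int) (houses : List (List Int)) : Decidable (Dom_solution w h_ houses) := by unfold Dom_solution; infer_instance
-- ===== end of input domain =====

-- B replaces A's worklist BFS by a queue-free Gauss-Seidel label-propagation fixpoint
-- (repeated full-grid sweeps until stable) plus a separate pass summing in-bounds house
-- neighbours of the reached region (objective: alternative algorithm, no speed claim).

-- ===== PORT A =====
def dirEvenA : List (Int × Int) := [(-1, 0), (-1, 1), (0, -1), (0, 1), (1, 0), (1, 1)]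
def dirOddA : List (Int × Int) := [(-1, -1), (-1, 0), (0, -1), (0, 1), (1, -1), (1, 0)]
def dirDictA : PySem.Dict Int (List (Int × Int)) := PySem.Dict.ofList [(0, dirOddA), (1, dirEvenA)]

-- houses[x][y]; the defaults are only reached where Python raises IndexError (outside Pre_)
def cellA (houses : List (List Int)) (x y : Int) : Int :=
  PySem.List.pyGetD (PySem.List.pyGetD houses x []) y 0

-- body of A's 'for x2, y2 in dir_idx[x1 % 2]' loop; state = (counter, visited, queue)
def stepA (w h_ : Int) (houses : List (List Int)) (x1 y1 : Int)
    (st : Int × PySem.Set (Int × Int) × List (Int × Int)) (d : Int × Int) :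
    Int × PySem.Set (Int × Int) × List (Int × Int) :=
  let x := x1 + d.1
  let y := y1 + d.2
  if x < 0 ∨ h_ ≤ x ∨ y < 0 ∨ w ≤ y then st
  else
    let c := if cellA houses x y = 1 then st.1 + 1 else st.1
    if PySem.Set.contains st.2.1 (x, y) = true ∨ cellA houses x y = 1 then (c, st.2.1, st.2.2)
    else (c, PySem.Set.add st.2.1 (x, y), st.2.2 ++ [(x, y)])

-- A's 'while queue' loop; fuel bounds the iteration count (dequeues ≤ 1 + h*w < fuel)
def loopA (w h_ : Int) (houses : List (List Int)) :
    Nat → Int × PySem.Set (Int × Int) × List (Int × Int) → Int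
  | 0, st => st.1
  | fuel + 1, (counter, visited, queue) =>
    match queue with
    | [] => counter
    | (x1, y1) :: qs =>
      let dirs := PySem.Dict.getD dirDictA (PySem.Int.mod x1 2) []
      loopA w h_ houses fuel (dirs.foldl (stepA w h_ houses x1 y1) (counter, visited, qs))

def solution (w : Int) (h_ : Int) (houses : List (List Int)) : Int :=
  loopA w h_ houses (h_.toNat * w.toNat + 2)
    (0, PySem.Set.add PySem.Set.empty (0, 0), [(0, 0)])

-- ===== PORT B =====
def dirEvenB : List (Int × Int) := [(-1, 0), (-1, 1), (0, -1), (0, 1), (1, 0), (1, 1)]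
def dirOddB : List (Int × Int) := [(-1, -1), (-1, 0), (0, -1), (0, 1), (1, -1), (1, 0)]

def dirsForB (x : Int) : List (Int × Int) :=
  if PySem.Int.mod x 2 = 1 then dirEvenB else dirOddB

-- houses[x][y]; the defaults are only reached where Python raises IndexError (outside Pre_)
def cellB (houses : List (List Int)) (x y : Int) : Int :=
  PySem.List.pyGetD (PySem.List.pyGetD houses x []) y 0

-- innermost 'for dx, dy in dirs_for(x)' of B's sweep; state = (reach, changed)
def spreadB (w h_ : Int) (houses : List (List Int)) (x y : Int)
    (st : PySem.Set (Int × Int) × Bool) (d : Int × Int) :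
    PySem.Set (Int × Int) × Bool :=
  let nx := x + d.1
  let ny := y + d.2
  if 0 ≤ nx ∧ nx < h_ ∧ 0 ≤ ny ∧ ny < w ∧ cellB houses nx ny ≠ 1 ∧
      ¬ PySem.Set.contains st.1 (nx, ny) = true then
    (PySem.Set.add st.1 (nx, ny), true)
  else st

-- body of the per-cell step of a sweep: spread only from already-reached cells
def cellStepB (w h_ : Int) (houses : List (List Int))
    (st : PySem.Set (Int × Int) × Bool) (x y : Int) :
    PySem.Set (Int × Int) × Bool :=
  if PySem.Set.contains st.1 (x, y) = true then
    (dirsForB x).foldl (spreadB w h_ houses x y) st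
  else st

-- one full sweep 'for x in range(h): for y in range(w): …' with changed reset to False
def sweepB (w h_ : Int) (houses : List (List Int)) (r : PySem.Set (Int × Int)) :
    PySem.Set (Int × Int) × Bool :=
  (PySem.List.pyRange 0 h_ 1).foldl
    (fun st x => (PySem.List.pyRange 0 w 1).foldl (fun st2 y => cellStepB w h_ houses st2 x y) st)
    (r, false)

-- B's 'while changed' loop (first test is always True, so it is a do-while);
-- fuel bounds the number of sweeps (each non-final sweep grows reach, ≤ h*w+1 cells)
def loopB (w h_ : Int) (houses : List (List Int)) :
    Nat → PySem.Set (Int × Int) → PySem.Set (Int × Int)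
  | 0, r => r
  | fuel + 1, r =>
    let st := sweepB w h_ houses r
    if st.2 then loopB w h_ houses fuel st.1 else st.1

-- B's final generator sum: in-bounds house neighbours of one reached cell
def nbHousesB (w h_ : Int) (houses : List (List Int)) (c : Int × Int) : Int :=
  (dirsForB c.1).foldl
    (fun acc d =>
      acc +
        if 0 ≤ c.1 + d.1 ∧ c.1 + d.1 < h_ ∧ 0 ≤ c.2 + d.2 ∧ c.2 + d.2 < w ∧
            cellB houses (c.1 + d.1) (c.2 + d.2) = 1 then 1 else 0) 0

def solution_alt (w : Int) (h_ : Int) (houses : List (List Int)) : Int :=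
  if h_ ≤ 0 ∨ w ≤ 0 then 0
  else (loopB w h_ houses (h_.toNat * w.toNat + 2)
      (PySem.Set.add PySem.Set.empty (0, 0))).foldl
    (fun acc c => acc + nbHousesB w h_ houses c) 0

-- ===== PRECONDITION & SPEC =====
-- Pre_ excludes grids that do not cover the full h×w rectangle (unless h ≤ 0 or w ≤ 0):
-- on those A raises IndexError when the flood fill reaches a missing cell, and is excluded
-- even when the fill happens to stay inside the available cells and A returns (see cites).
def Pre_solution (w : Int) (h_ : Int) (houses : List (List Int)) : Prop :=
  h_ ≤ 0 ∨ w ≤ 0 ∨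
    (h_ ≤ (houses.length : Int) ∧ ∀ row ∈ houses.take h_.toNat, w ≤ (row.length : Int))
instance (w : Int) (h_ : Int) (houses : List (List Int)) : Decidable (Pre_solution w h_ houses) := by
  unfold Pre_solution; infer_instance

def pvWitness_solution : Int × Int × List (List Int) := (2, 2, [[0, 1], [1, 0]])

def Spec_solution (w : Int) (h_ : Int) (houses : List (List Int)) (out : Int) : Prop :=
  out = solution_alt w h_ houses
instance (w : Int) (h_ : Int) (houses : List (List Int)) (out : Int) : Decidable (Spec_solution w h_ houses out) := by
  unfold Spec_solution; infer_instance

-- ===== CLAIM (what is proved, stated in full; the proofs are below) =====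
def Claim_equal_solution : Prop := ∀ (w : Int) (h_ : Int) (houses : List (List Int)), Dom_solution w h_ houses → Pre_solution w h_ houses → Spec_solution w h_ houses (solution w h_ houses)

-- ===== LEMMAS AND PROOFS =====

-- the two ports read the grid identically
theorem cellA_eq_cellB (houses : List (List Int)) (x y : Int) :
    cellA houses x y = cellB houses x y := rfl

-- A's dict lookup of the parity tables equals B's conditional (x % 2 is always 0 or 1)
theorem dirs_eq (x : Int) :
    PySem.Dict.getD dirDictA (PySem.Int.mod x 2) [] = dirsForB x := by
  rcases PySem.Int.mod_two_eq x with h | h <;> rw [dirsForB, h] <;> rfl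

-- in-bounds predicate for the h×w rectangle
def inbP (w h_ : Int) (c : Int × Int) : Prop :=
  0 ≤ c.1 ∧ c.1 < h_ ∧ 0 ≤ c.2 ∧ c.2 < w

-- cells reachable from (0,0) by hex steps through in-bounds water cells
inductive ReachP (w h_ : Int) (houses : List (List Int)) : Int × Int → Prop
  | base : ReachP w h_ houses (0, 0)
  | step {c : Int × Int} {d : Int × Int} :
      ReachP w h_ houses c → d ∈ dirsForB c.1 →
      inbP w h_ (c.1 + d.1, c.2 + d.2) →
      cellB houses (c.1 + d.1) (c.2 + d.2) ≠ 1 →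
      ReachP w h_ houses (c.1 + d.1, c.2 + d.2)

-- 0/1 indicator of "direction d of cell (cx, cy) hits an in-bounds house"
def indH (w h_ : Int) (houses : List (List Int)) (cx cy : Int) (d : Int × Int) : Int :=
  if 0 ≤ cx + d.1 ∧ cx + d.1 < h_ ∧ 0 ≤ cy + d.2 ∧ cy + d.2 < w ∧
      cellB houses (cx + d.1) (cy + d.2) = 1 then 1 else 0

-- per-cell house-neighbour count used by both sides of the proof
def nbP (w h_ : Int) (houses : List (List Int)) (c : Int × Int) : Int :=
  ((dirsForB c.1).map (indH w h_ houses c.1 c.2)).sum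

theorem nbHousesB_eq_nbP (w h_ : Int) (houses : List (List Int)) (c : Int × Int) :
    nbHousesB w h_ houses c = nbP w h_ houses c := by
  rw [nbHousesB,
    show (fun (acc : Int) (d : Int × Int) =>
        acc +
          if 0 ≤ c.1 + d.1 ∧ c.1 + d.1 < h_ ∧ 0 ≤ c.2 + d.2 ∧ c.2 + d.2 < w ∧
              cellB houses (c.1 + d.1) (c.2 + d.2) = 1 then 1 else 0) =
      (fun acc d => acc + indH w h_ houses c.1 c.2 d) from rfl,
    PySem.List.foldl_add, nbP]
  ring

-- all cells of the rectangle plus the start cell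
noncomputable def rectO (w h_ : Int) : Finset (Int × Int) :=
  insert ((0 : Int), (0 : Int)) (Finset.Icc 0 (h_ - 1) ×ˢ Finset.Icc 0 (w - 1))

theorem card_rectO (w h_ : Int) : (rectO w h_).card ≤ h_.toNat * w.toNat + 1 := by
  have h1 := Finset.card_insert_le ((0 : Int), (0 : Int))
    (Finset.Icc (0 : Int) (h_ - 1) ×ˢ Finset.Icc (0 : Int) (w - 1))
  rw [rectO]
  have h2 : (Finset.Icc (0 : Int) (h_ - 1) ×ˢ Finset.Icc (0 : Int) (w - 1)).card =
      h_.toNat * w.toNat := by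
    rw [Finset.card_product, Int.card_Icc, Int.card_Icc]
    have e1 : (h_ - 1 + 1 - 0 : Int).toNat = h_.toNat := by omega
    have e2 : (w - 1 + 1 - 0 : Int).toNat = w.toNat := by omega
    rw [e1, e2]
  omega

theorem reach_mem_rectO (w h_ : Int) (houses : List (List Int)) (c : Int × Int)
    (h : ReachP w h_ houses c) : c ∈ rectO w h_ := by
  induction h with
  | base => exact Finset.mem_insert_self _ _
  | step _ _ hinb _ _ =>
    refine Finset.mem_insert_of_mem ?_
    rw [Finset.mem_product, Finset.mem_Icc, Finset.mem_Icc]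
    obtain ⟨a, b, cc, dd⟩ := hinb
    exact ⟨⟨a, by omega⟩, ⟨cc, by omega⟩⟩

theorem reach_shape (w h_ : Int) (houses : List (List Int)) (c : Int × Int)
    (h : ReachP w h_ houses c) :
    c = (0, 0) ∨ (inbP w h_ c ∧ cellB houses c.1 c.2 ≠ 1) := by
  cases h with
  | base => exact Or.inl rfl
  | step _ _ hinb hw => exact Or.inr ⟨hinb, hw⟩

theorem nodup_length_le_card (l : List (Int × Int)) (s : Finset (Int × Int))
    (hn : l.Nodup) (hs : ∀ z ∈ l, z ∈ s) : l.length ≤ s.card := by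
  rw [← List.toFinset_card_of_nodup hn]
  exact Finset.card_le_card (fun z hz => hs z (List.mem_toFinset.mp hz))

-- ---------- A side ----------

-- one direction-list fold of A, characterised
theorem foldA_step (w h_ : Int) (houses : List (List Int)) (cx cy : Int)
    (ds : List (Int × Int)) :
    ∀ (c : Int) (v : PySem.Set (Int × Int)) (qu : List (Int × Int)),
      ∃ new,
        ds.foldl (stepA w h_ houses cx cy) (c, v, qu) =
          (c + (ds.map (indH w h_ houses cx cy)).sum,
            (ds.foldl (stepA w h_ houses cx cy) (c, v, qu)).2.1, qu ++ new) ∧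
        (∀ z, z ∈ (ds.foldl (stepA w h_ houses cx cy) (c, v, qu)).2.1 ↔ z ∈ v ∨ z ∈ new) ∧
        new.Nodup ∧
        (∀ z ∈ new, z ∉ v ∧ inbP w h_ z ∧ cellB houses z.1 z.2 ≠ 1 ∧
          ∃ d ∈ ds, z = (cx + d.1, cy + d.2)) ∧
        (∀ d ∈ ds, inbP w h_ (cx + d.1, cy + d.2) → cellB houses (cx + d.1) (cy + d.2) ≠ 1 →
          (cx + d.1, cy + d.2) ∈ (ds.foldl (stepA w h_ houses cx cy) (c, v, qu)).2.1) := by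
  induction ds with
  | nil =>
    intro c v qu
    exact ⟨[], by simp, by simp, List.nodup_nil, by simp, by simp⟩
  | cons d ds ihds =>
    intro c v qu
    rw [List.foldl_cons, List.map_cons, List.sum_cons]
    by_cases h1 : cx + d.1 < 0 ∨ h_ ≤ cx + d.1 ∨ cy + d.2 < 0 ∨ w ≤ cy + d.2
    · -- out of bounds: step is the identity
      have hst : stepA w h_ houses cx cy (c, v, qu) d = (c, v, qu) := by
        simp only [stepA]; rw [if_pos h1]
      have hind : indH w h_ houses cx cy d = 0 := by
        rw [indH, if_neg]; rintro ⟨b1, b2, b3, b4, -⟩; omega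
      rw [hst, hind, zero_add]
      obtain ⟨new, e1, e2, e3, e4, e5⟩ := ihds c v qu
      refine ⟨new, e1, e2, e3, ?_, ?_⟩
      · intro z hz
        obtain ⟨p1, p2, p3, d', hd', he⟩ := e4 z hz
        exact ⟨p1, p2, p3, d', List.mem_cons_of_mem _ hd', he⟩
      · intro d' hd' hinb hw
        rcases List.mem_cons.mp hd' with rfl | hd''
        · exact absurd h1 (by obtain ⟨b1, b2, b3, b4⟩ := hinb; omega)
        · exact e5 d' hd'' hinb hw
    · by_cases hcell : cellA houses (cx + d.1) (cy + d.2) = 1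
      · -- in-bounds house: count it, do not enqueue
        have hst : stepA w h_ houses cx cy (c, v, qu) d = (c + 1, v, qu) := by
          simp only [stepA]; rw [if_neg h1, if_pos hcell, if_pos (Or.inr hcell)]
        have hind : indH w h_ houses cx cy d = 1 := by
          rw [indH, if_pos ⟨by omega, by omega, by omega, by omega, hcell⟩]
        rw [hst, hind]
        obtain ⟨new, e1, e2, e3, e4, e5⟩ := ihds (c + 1) v qu
        refine ⟨new, by rw [e1]; ring_nf, e2, e3, ?_, ?_⟩
        · intro z hz
          obtain ⟨p1, p2, p3, d', hd', he⟩ := e4 z hz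
          exact ⟨p1, p2, p3, d', List.mem_cons_of_mem _ hd', he⟩
        · intro d' hd' hinb hw
          rcases List.mem_cons.mp hd' with rfl | hd''
          · exact absurd (cellA_eq_cellB houses _ _ ▸ hcell) hw
          · exact e5 d' hd'' hinb hw
      · by_cases hvis : PySem.Set.contains v (cx + d.1, cy + d.2) = true
        · -- already visited water cell: nothing changes
          have hst : stepA w h_ houses cx cy (c, v, qu) d = (c, v, qu) := by
            simp only [stepA]; rw [if_neg h1, if_neg hcell, if_pos (Or.inl hvis)]
          have hind : indH w h_ houses cx cy d = 0 := by
            rw [indH, if_neg]; rintro ⟨-, -, -, -, hb⟩; exact hcell hb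
          rw [hst, hind, zero_add]
          obtain ⟨new, e1, e2, e3, e4, e5⟩ := ihds c v qu
          refine ⟨new, e1, e2, e3, ?_, ?_⟩
          · intro z hz
            obtain ⟨p1, p2, p3, d', hd', he⟩ := e4 z hz
            exact ⟨p1, p2, p3, d', List.mem_cons_of_mem _ hd', he⟩
          · intro d' hd' hinb hw
            rcases List.mem_cons.mp hd' with rfl | hd''
            · exact (e2 _).mpr (Or.inl ((PySem.Set.contains_iff _ _).mp hvis))
            · exact e5 d' hd'' hinb hw
        · -- fresh water cell: add to visited and enqueue
          have hst : stepA w h_ houses cx cy (c, v, qu) d =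
              (c, PySem.Set.add v (cx + d.1, cy + d.2), qu ++ [(cx + d.1, cy + d.2)]) := by
            simp only [stepA]
            rw [if_neg h1, if_neg hcell, if_neg (by rintro (hv | hb); exacts [hvis hv, hcell hb])]
          have hind : indH w h_ houses cx cy d = 0 := by
            rw [indH, if_neg]; rintro ⟨-, -, -, -, hb⟩; exact hcell hb
          rw [hst, hind, zero_add]
          obtain ⟨new, e1, e2, e3, e4, e5⟩ :=
            ihds c (PySem.Set.add v (cx + d.1, cy + d.2)) (qu ++ [(cx + d.1, cy + d.2)])
          have hzv : (cx + d.1, cy + d.2) ∉ v :=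
            fun hm => hvis ((PySem.Set.contains_iff _ _).mpr hm)
          refine ⟨(cx + d.1, cy + d.2) :: new, ?_, ?_, ?_, ?_, ?_⟩
          · rw [e1]
            simp [List.append_assoc]
          · intro z
            rw [e2 z, PySem.Set.mem_add]
            constructor
            · rintro ((hz | rfl) | hz)
              · exact Or.inl hz
              · exact Or.inr (List.mem_cons_self)
              · exact Or.inr (List.mem_cons_of_mem _ hz)
            · rintro (hz | hz)
              · exact Or.inl (Or.inl hz)
              · rcases List.mem_cons.mp hz with rfl | hz'
                · exact Or.inl (Or.inr rfl)
                · exact Or.inr hz'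
          · rw [List.nodup_cons]
            refine ⟨fun hm => ?_, e3⟩
            exact (e4 _ hm).1 ((PySem.Set.mem_add _ _ _).mpr (Or.inr rfl))
          · intro z hz
            rcases List.mem_cons.mp hz with rfl | hz'
            · exact ⟨hzv, ⟨by omega, by omega, by omega, by omega⟩,
                cellA_eq_cellB houses _ _ ▸ hcell, d, List.mem_cons_self, rfl⟩
            · obtain ⟨p1, p2, p3, d', hd', he⟩ := e4 z hz'
              exact ⟨fun hm => p1 ((PySem.Set.mem_add _ _ _).mpr (Or.inl hm)), p2, p3,
                d', List.mem_cons_of_mem _ hd', he⟩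
          · intro d' hd' hinb hw
            rcases List.mem_cons.mp hd' with rfl | hd''
            · exact (e2 _).mpr (Or.inl ((PySem.Set.mem_add _ _ _).mpr (Or.inr rfl)))
            · exact e5 d' hd'' hinb hw

-- A's loop: processed cells P, queue q; the loop sums nbP over the cells still to be
-- dequeued, and the complete dequeue sequence is exactly the reachable set
theorem loopA_spec (w h_ : Int) (houses : List (List Int)) :
    ∀ (fuel : Nat) (P q : List (Int × Int)) (c : Int) (v : PySem.Set (Int × Int)),
      (P ++ q).Nodup →
      (∀ z, z ∈ v ↔ z ∈ P ++ q) →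
      (∀ z ∈ P ++ q, ReachP w h_ houses z) →
      (∀ p ∈ P, ∀ d ∈ dirsForB p.1, inbP w h_ (p.1 + d.1, p.2 + d.2) →
        cellB houses (p.1 + d.1) (p.2 + d.2) ≠ 1 → ((p.1 + d.1, p.2 + d.2) : Int × Int) ∈ v) →
      ((0, 0) : Int × Int) ∈ P ++ q →
      (rectO w h_).card + 1 ≤ fuel + P.length →
      ∃ ext, loopA w h_ houses fuel (c, v, q) = c + ((q ++ ext).map (nbP w h_ houses)).sum ∧
        (P ++ q ++ ext).Nodup ∧ (∀ z, z ∈ P ++ q ++ ext ↔ ReachP w h_ houses z) := by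
  intro fuel
  induction fuel with
  | zero =>
    intro P q c v hn hv hR hcl h00 hcard
    exfalso
    have hlen : P.length ≤ (rectO w h_).card :=
      nodup_length_le_card P _ ((List.nodup_append.mp hn).1)
        (fun z hz => reach_mem_rectO w h_ houses z (hR z (List.mem_append_left _ hz)))
    omega
  | succ fuel ih =>
    intro P q c v hn hv hR hcl h00 hcard
    cases q with
    | nil =>
      refine ⟨[], by simp [loopA], by simpa using hn, ?_⟩
      intro z
      simp only [List.append_nil]
      constructor
      · exact fun hz => hR z (by simpa using hz)
      · intro hz
        induction hz with
        | base => simpa using h00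
        | step a hd hinb hw ihc =>
          rename_i cc dd
          have := hcl cc (by simpa using ihc) dd hd hinb hw
          simpa using (hv _).mp this
    | cons p qs =>
      obtain ⟨px, py⟩ := p
      have hunf : loopA w h_ houses (fuel + 1) (c, v, (px, py) :: qs) =
          loopA w h_ houses fuel
            ((dirsForB px).foldl (stepA w h_ houses px py) (c, v, qs)) := by
        simp only [loopA]
        rw [dirs_eq]
      obtain ⟨new, e1, e2, e3, e4, e5⟩ := foldA_step w h_ houses px py (dirsForB px) c v qs
      have hpmem : ((px, py) : Int × Int) ∈ P ++ (px, py) :: qs := by simp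
      obtain ⟨ext, f1, f2, f3⟩ := ih (P ++ [(px, py)]) (qs ++ new)
        (c + ((dirsForB px).map (indH w h_ houses px py)).sum)
        ((dirsForB px).foldl (stepA w h_ houses px py) (c, v, qs)).2.1
        (by
          have hgoal : (P ++ [(px, py)]) ++ (qs ++ new) = (P ++ (px, py) :: qs) ++ new := by
            simp
          rw [hgoal, List.nodup_append]
          refine ⟨hn, e3, ?_⟩
          intro a ha b hb heq
          exact (e4 b hb).1 ((hv b).mpr (heq ▸ ha)))
        (by
          intro z
          rw [e2 z, hv z]
          simp only [List.mem_append, List.mem_cons]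
          tauto)
        (by
          intro z hz
          rcases List.mem_append.mp hz with hz1 | hz2
          · rcases List.mem_append.mp hz1 with hz3 | hz3
            · exact hR z (List.mem_append_left _ hz3)
            · rw [List.mem_singleton.mp hz3]; exact hR _ hpmem
          · rcases List.mem_append.mp hz2 with hz3 | hz3
            · exact hR z (by simp [hz3])
            · obtain ⟨-, p2, p3, d', hd', he⟩ := e4 z hz3
              subst he
              exact ReachP.step (hR _ hpmem) hd' p2 p3)
        (by
          intro p' hp'
          rcases List.mem_append.mp hp' with hp'' | hp''
          · exact fun d' hd' hinb hw => (e2 _).mpr (Or.inl (hcl p' hp'' d' hd' hinb hw))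
          · have hpe : p' = (px, py) := List.mem_singleton.mp hp''
            subst hpe
            exact fun d' hd' hinb hw => e5 d' hd' hinb hw)
        (by
          have := h00
          simp only [List.mem_append, List.mem_cons] at this ⊢
          tauto)
        (by simp; omega)
      refine ⟨new ++ ext, ?_, ?_, ?_⟩
      · rw [hunf, e1, f1]
        simp only [nbP, List.map_append, List.sum_append, List.map_cons, List.sum_cons]
        ring
      · simpa [List.append_assoc] using f2
      · intro z
        have := f3 z
        simp only [List.mem_append, List.mem_cons] at this ⊢
        tauto

-- ---------- B side ----------

abbrev invB (w h_ : Int) (houses : List (List Int)) (r : PySem.Set (Int × Int)) : Prop :=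
  r.Nodup ∧ (∀ z ∈ r, ReachP w h_ houses z) ∧ ((0, 0) : Int × Int) ∈ r

-- a generic fold preserves invB and monotonicity if each step does
theorem foldB_pres {β : Type} (w h_ : Int) (houses : List (List Int))
    (f : PySem.Set (Int × Int) × Bool → β → PySem.Set (Int × Int) × Bool) :
    ∀ (l : List β),
      (∀ st x, x ∈ l → invB w h_ houses st.1 → invB w h_ houses (f st x).1 ∧
        ∀ z ∈ st.1, z ∈ (f st x).1) →
      ∀ (st : PySem.Set (Int × Int) × Bool), invB w h_ houses st.1 →
        invB w h_ houses (l.foldl f st).1 ∧ ∀ z ∈ st.1, z ∈ (l.foldl f st).1 := by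
  intro l
  induction l with
  | nil => exact fun _ st h => ⟨h, fun z hz => hz⟩
  | cons x xs ih =>
    intro hf st h
    obtain ⟨h1, h2⟩ := hf st x (by simp) h
    obtain ⟨g1, g2⟩ := ih (fun st x hx => hf st x (by simp [hx])) (f st x) h1
    exact ⟨g1, fun z hz => g2 z (h2 z hz)⟩

-- a fold of flag-monotone steps keeps a true flag true
theorem foldB_flagmono {β : Type}
    (f : PySem.Set (Int × Int) × Bool → β → PySem.Set (Int × Int) × Bool)
    (hmono : ∀ st x, st.2 = true → (f st x).2 = true) :
    ∀ (l : List β) (st : PySem.Set (Int × Int) × Bool), st.2 = true →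
      (l.foldl f st).2 = true := by
  intro l
  induction l with
  | nil => exact fun st h => h
  | cons x xs ih => exact fun st h => ih (f st x) (hmono st x h)

-- a fold of membership-monotone steps is membership-monotone
theorem foldB_memmono {β : Type}
    (f : PySem.Set (Int × Int) × Bool → β → PySem.Set (Int × Int) × Bool)
    (hmono : ∀ st x, ∀ z ∈ st.1, z ∈ (f st x).1) :
    ∀ (l : List β) (st : PySem.Set (Int × Int) × Bool), ∀ z ∈ st.1,
      (z ∈ (l.foldl f st).1) := by
  intro l
  induction l with
  | nil => exact fun st z hz => hz
  | cons x xs ih => exact fun st z hz => ih (f st x) z (hmono st x z hz)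

-- a generic fold whose final changed-flag is false did nothing, and each step's
-- no-change fact Q holds of the common state
theorem foldB_flag {β : Type}
    (f : PySem.Set (Int × Int) × Bool → β → PySem.Set (Int × Int) × Bool)
    (Q : PySem.Set (Int × Int) × Bool → β → Prop)
    (hmono : ∀ st x, st.2 = true → (f st x).2 = true)
    (hstep : ∀ st x, (f st x).2 = false → f st x = st ∧ Q st x) :
    ∀ (l : List β) (st : PySem.Set (Int × Int) × Bool), (l.foldl f st).2 = false →
      l.foldl f st = st ∧ ∀ x ∈ l, Q st x := by
  intro l
  induction l with
  | nil => exact fun st _ => ⟨rfl, by simp⟩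
  | cons x xs ih =>
    intro st h
    rw [List.foldl_cons] at h
    have hx : (f st x).2 = false := by
      by_contra hc
      rw [foldB_flagmono f hmono xs (f st x) (by simpa using hc)] at h
      exact absurd h (by simp)
    obtain ⟨heq, hQ⟩ := hstep st x hx
    rw [heq] at h
    obtain ⟨h1, h2⟩ := ih st h
    refine ⟨by rw [List.foldl_cons, heq, h1], ?_⟩
    intro y hy
    rcases List.mem_cons.mp hy with rfl | hy'
    · exact hQ
    · exact h2 y hy'

-- a generic fold whose changed-flag flips from false to true added an element
theorem foldB_grow {β : Type}
    (f : PySem.Set (Int × Int) × Bool → β → PySem.Set (Int × Int) × Bool)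
    (hmono : ∀ st x, ∀ z ∈ st.1, z ∈ (f st x).1)
    (hstep : ∀ st x, (f st x).2 = true → st.2 = true ∨ ∃ z, z ∉ st.1 ∧ z ∈ (f st x).1) :
    ∀ (l : List β) (st : PySem.Set (Int × Int) × Bool), (l.foldl f st).2 = true →
      st.2 = true ∨ ∃ z, z ∉ st.1 ∧ z ∈ (l.foldl f st).1 := by
  intro l
  induction l with
  | nil => exact fun st h => Or.inl h
  | cons x xs ih =>
    intro st h
    rw [List.foldl_cons] at h
    rcases ih (f st x) h with h1 | ⟨z, hz1, hz2⟩
    · rcases hstep st x h1 with h2 | ⟨z, hz1, hz2⟩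
      · exact Or.inl h2
      · exact Or.inr ⟨z, hz1, by
          rw [List.foldl_cons]
          exact foldB_memmono f hmono xs (f st x) z hz2⟩
    · exact Or.inr ⟨z, fun hc => hz1 (hmono st x z hc), by rw [List.foldl_cons]; exact hz2⟩

theorem spreadB_memmono (w h_ : Int) (houses : List (List Int)) (x y : Int)
    (st : PySem.Set (Int × Int) × Bool) (d : Int × Int) :
    ∀ z ∈ st.1, z ∈ (spreadB w h_ houses x y st d).1 := by
  intro z hz
  simp only [spreadB]
  split_ifs with hc
  · exact (PySem.Set.mem_add _ _ _).mpr (Or.inl hz)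
  · exact hz

theorem spreadB_flagmono (w h_ : Int) (houses : List (List Int)) (x y : Int)
    (st : PySem.Set (Int × Int) × Bool) (d : Int × Int) (h : st.2 = true) :
    (spreadB w h_ houses x y st d).2 = true := by
  simp only [spreadB]
  split_ifs with hc
  · rfl
  · exact h

theorem cellStepB_memmono (w h_ : Int) (houses : List (List Int)) (x y : Int)
    (st : PySem.Set (Int × Int) × Bool) :
    ∀ z ∈ st.1, z ∈ (cellStepB w h_ houses st x y).1 := by
  intro z hz
  simp only [cellStepB]
  split_ifs with hc
  · exact foldB_memmono _ (spreadB_memmono w h_ houses x y) _ st z hz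
  · exact hz

theorem cellStepB_flagmono (w h_ : Int) (houses : List (List Int)) (x y : Int)
    (st : PySem.Set (Int × Int) × Bool) (h : st.2 = true) :
    (cellStepB w h_ houses st x y).2 = true := by
  simp only [cellStepB]
  split_ifs with hc
  · exact foldB_flagmono _ (spreadB_flagmono w h_ houses x y) _ st h
  · exact h

theorem cellStepB_pres (w h_ : Int) (houses : List (List Int)) (x y : Int)
    (st : PySem.Set (Int × Int) × Bool) (h : invB w h_ houses st.1) :
    invB w h_ houses (cellStepB w h_ houses st x y).1 ∧
      ∀ z ∈ st.1, z ∈ (cellStepB w h_ houses st x y).1 := by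
  simp only [cellStepB]
  split_ifs with hc
  · have hxy : ReachP w h_ houses (x, y) :=
      h.2.1 (x, y) ((PySem.Set.contains_iff _ _).mp hc)
    refine foldB_pres w h_ houses _ (dirsForB x) ?_ st h
    intro st' d hd hinv
    constructor
    · simp only [spreadB]
      split_ifs with hcond
      · refine ⟨PySem.Set.nodup_add _ _ hinv.1, ?_, (PySem.Set.mem_add _ _ _).mpr (Or.inl hinv.2.2)⟩
        intro z hz
        rcases (PySem.Set.mem_add _ _ _).mp hz with hz' | rfl
        · exact hinv.2.1 z hz'
        · exact ReachP.step hxy hd ⟨hcond.1, hcond.2.1, hcond.2.2.1, hcond.2.2.2.1⟩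
            hcond.2.2.2.2.1
      · exact hinv
    · exact spreadB_memmono w h_ houses x y st' d
  · exact ⟨h, fun z hz => hz⟩

theorem sweepB_pres (w h_ : Int) (houses : List (List Int)) (r : PySem.Set (Int × Int))
    (hr : invB w h_ houses r) :
    invB w h_ houses (sweepB w h_ houses r).1 ∧ ∀ z ∈ r, z ∈ (sweepB w h_ houses r).1 := by
  refine foldB_pres w h_ houses _ _ ?_ (r, false) hr
  intro st x _ h
  refine foldB_pres w h_ houses _ _ ?_ st h
  intro st2 y _ h2
  exact cellStepB_pres w h_ houses x y st2 h2

-- a sweep that reports no change did nothing, and the region is closed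
theorem sweepB_stable (w h_ : Int) (houses : List (List Int)) (r : PySem.Set (Int × Int))
    (h : (sweepB w h_ houses r).2 = false) :
    (sweepB w h_ houses r).1 = r ∧
    ∀ x y : Int, 0 ≤ x → x < h_ → 0 ≤ y → y < w → (x, y) ∈ r →
      ∀ d ∈ dirsForB x, inbP w h_ (x + d.1, y + d.2) →
        cellB houses (x + d.1) (y + d.2) ≠ 1 → ((x + d.1, y + d.2) : Int × Int) ∈ r := by
  -- innermost flag lemma for spreadB
  have hspread_step : ∀ (x y : Int) (st : PySem.Set (Int × Int) × Bool) (d : Int × Int),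
      (spreadB w h_ houses x y st d).2 = false →
      spreadB w h_ houses x y st d = st ∧
        (inbP w h_ (x + d.1, y + d.2) → cellB houses (x + d.1) (y + d.2) ≠ 1 →
          ((x + d.1, y + d.2) : Int × Int) ∈ st.1) := by
    intro x y st d hf
    simp only [spreadB] at hf ⊢
    split_ifs at hf ⊢ with hc
    refine ⟨rfl, ?_⟩
    intro hinb hw
    by_contra hmem
    exact hc ⟨hinb.1, hinb.2.1, hinb.2.2.1, hinb.2.2.2, hw,
      fun hcon => hmem ((PySem.Set.contains_iff _ _).mp hcon)⟩
  -- flag lemma for cellStepB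
  have hcell_step : ∀ (x : Int) (st : PySem.Set (Int × Int) × Bool) (y : Int),
      (cellStepB w h_ houses st x y).2 = false →
      cellStepB w h_ houses st x y = st ∧
        ((x, y) ∈ st.1 → ∀ d ∈ dirsForB x, inbP w h_ (x + d.1, y + d.2) →
          cellB houses (x + d.1) (y + d.2) ≠ 1 → ((x + d.1, y + d.2) : Int × Int) ∈ st.1) := by
    intro x st y hf
    simp only [cellStepB] at hf ⊢
    split_ifs at hf ⊢ with hc
    · obtain ⟨h1, h2⟩ := foldB_flag _ _ (spreadB_flagmono w h_ houses x y)
        (hspread_step x y) (dirsForB x) st hf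
      exact ⟨h1, fun _ d hd => h2 d hd⟩
    · exact ⟨rfl, fun hmem => absurd ((PySem.Set.contains_iff _ _).mpr hmem) hc⟩
  -- flag lemma for a whole row
  have hrow_step : ∀ (st : PySem.Set (Int × Int) × Bool) (x : Int),
      ((PySem.List.pyRange 0 w 1).foldl (fun st2 y => cellStepB w h_ houses st2 x y) st).2 = false →
      (PySem.List.pyRange 0 w 1).foldl (fun st2 y => cellStepB w h_ houses st2 x y) st = st ∧
        (∀ y ∈ PySem.List.pyRange 0 w 1, (x, y) ∈ st.1 → ∀ d ∈ dirsForB x,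
          inbP w h_ (x + d.1, y + d.2) → cellB houses (x + d.1) (y + d.2) ≠ 1 →
          ((x + d.1, y + d.2) : Int × Int) ∈ st.1) := by
    intro st x hf
    obtain ⟨h1, h2⟩ := foldB_flag _ _ (fun st2 y => cellStepB_flagmono w h_ houses x y st2)
      (hcell_step x) (PySem.List.pyRange 0 w 1) st hf
    exact ⟨h1, fun y hy => h2 y hy⟩
  obtain ⟨h1, h2⟩ := foldB_flag _ _
    (fun st x => foldB_flagmono _ (fun st2 y => cellStepB_flagmono w h_ houses x y st2) _ st)
    hrow_step (PySem.List.pyRange 0 h_ 1) (r, false) h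
  refine ⟨congrArg Prod.fst h1, ?_⟩
  intro x y hx1 hx2 hy1 hy2 hmem d hd hinb hw
  exact h2 x (PySem.List.mem_pyRange_one.mpr ⟨hx1, hx2⟩) y
    (PySem.List.mem_pyRange_one.mpr ⟨hy1, hy2⟩) hmem d hd hinb hw

theorem sweepB_grow (w h_ : Int) (houses : List (List Int)) (r : PySem.Set (Int × Int))
    (h : (sweepB w h_ houses r).2 = true) :
    ∃ z, z ∉ r ∧ z ∈ (sweepB w h_ houses r).1 := by
  have hspread_grow : ∀ (x y : Int) (st : PySem.Set (Int × Int) × Bool) (d : Int × Int),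
      (spreadB w h_ houses x y st d).2 = true →
      st.2 = true ∨ ∃ z, z ∉ st.1 ∧ z ∈ (spreadB w h_ houses x y st d).1 := by
    intro x y st d hf
    simp only [spreadB] at hf ⊢
    split_ifs at hf ⊢ with hc
    · exact Or.inr ⟨(x + d.1, y + d.2),
        fun hmem => hc.2.2.2.2.2 ((PySem.Set.contains_iff _ _).mpr hmem),
        (PySem.Set.mem_add _ _ _).mpr (Or.inr rfl)⟩
    · exact Or.inl hf
  have hcell_grow : ∀ (x : Int) (st : PySem.Set (Int × Int) × Bool) (y : Int),
      (cellStepB w h_ houses st x y).2 = true →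
      st.2 = true ∨ ∃ z, z ∉ st.1 ∧ z ∈ (cellStepB w h_ houses st x y).1 := by
    intro x st y hf
    simp only [cellStepB] at hf ⊢
    split_ifs at hf ⊢ with hc
    · exact foldB_grow _ (spreadB_memmono w h_ houses x y) (hspread_grow x y)
        (dirsForB x) st hf
    · exact Or.inl hf
  have hrow_grow : ∀ (st : PySem.Set (Int × Int) × Bool) (x : Int),
      ((PySem.List.pyRange 0 w 1).foldl (fun st2 y => cellStepB w h_ houses st2 x y) st).2 = true →
      st.2 = true ∨ ∃ z, z ∉ st.1 ∧
        z ∈ ((PySem.List.pyRange 0 w 1).foldl (fun st2 y => cellStepB w h_ houses st2 x y) st).1 := by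
    intro st x
    exact foldB_grow _ (fun st2 y => cellStepB_memmono w h_ houses x y st2) (hcell_grow x)
      (PySem.List.pyRange 0 w 1) st
  have := foldB_grow _
    (fun st x => foldB_memmono _ (fun st2 y => cellStepB_memmono w h_ houses x y st2) _ st)
    hrow_grow (PySem.List.pyRange 0 h_ 1) (r, false) h
  rcases this with h1 | h1
  · exact absurd h1 (by simp)
  · exact h1

theorem loopB_spec (w h_ : Int) (houses : List (List Int)) :
    ∀ (fuel : Nat) (r : PySem.Set (Int × Int)), invB w h_ houses r →
      (rectO w h_).card + 2 ≤ fuel + r.length →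
      (loopB w h_ houses fuel r).Nodup ∧
      (∀ z, z ∈ loopB w h_ houses fuel r ↔ ReachP w h_ houses z) := by
  intro fuel
  induction fuel with
  | zero =>
    intro r hr hcard
    exfalso
    have hlen : r.length ≤ (rectO w h_).card :=
      nodup_length_le_card r _ hr.1
        (fun z hz => reach_mem_rectO w h_ houses z (hr.2.1 z hz))
    omega
  | succ fuel ih =>
    intro r hr hcard
    obtain ⟨hinv', hmono⟩ := sweepB_pres w h_ houses r hr
    by_cases hflag : (sweepB w h_ houses r).2 = true
    · have hstep : loopB w h_ houses (fuel + 1) r =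
          loopB w h_ houses fuel (sweepB w h_ houses r).1 := by
        simp only [loopB, hflag, if_true]
      rw [hstep]
      refine ih (sweepB w h_ houses r).1 hinv' ?_
      obtain ⟨z, hz1, hz2⟩ := sweepB_grow w h_ houses r hflag
      have hss : r.toFinset ⊂ (sweepB w h_ houses r).1.toFinset := by
        refine ⟨fun u hu => List.mem_toFinset.mpr (hmono u (List.mem_toFinset.mp hu)), ?_⟩
        intro hsup
        exact hz1 (List.mem_toFinset.mp (hsup (List.mem_toFinset.mpr hz2)))
      have hcardlt := Finset.card_lt_card hss
      rw [List.toFinset_card_of_nodup hr.1, List.toFinset_card_of_nodup hinv'.1] at hcardlt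
      omega
    · obtain ⟨heq, hclosed⟩ := sweepB_stable w h_ houses r (by simpa using hflag)
      have hstep : loopB w h_ houses (fuel + 1) r = r := by
        simp only [loopB]
        rw [if_neg hflag, heq]
      rw [hstep]
      refine ⟨hr.1, fun z => ⟨fun hz => hr.2.1 z hz, fun hz => ?_⟩⟩
      induction hz with
      | base => exact hr.2.2
      | step a hd hinb hw ihc =>
        rename_i c d
        rcases reach_shape w h_ houses c a with hc0 | ⟨hcinb, _⟩
        · subst hc0
          have hpos : (0 : Int) < h_ ∧ (0 : Int) < w := by
            obtain ⟨a1, a2, a3, a4⟩ := hinb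
            simp only at a1 a2 a3 a4
            constructor <;> omega
          exact hclosed 0 0 le_rfl hpos.1 le_rfl hpos.2 ihc d hd hinb hw
        · have := hclosed c.1 c.2 hcinb.1 hcinb.2.1 hcinb.2.2.1 hcinb.2.2.2
            (by simpa using ihc) d hd hinb hw
          simpa using this

-- ---------- putting it together ----------

theorem nbP_degenerate (w h_ : Int) (houses : List (List Int)) (c : Int × Int)
    (hdeg : h_ ≤ 0 ∨ w ≤ 0) : nbP w h_ houses c = 0 := by
  rw [nbP]
  refine List.sum_eq_zero ?_
  intro x hx
  obtain ⟨d, -, he⟩ := List.mem_map.mp hx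
  rw [← he, indH, if_neg]
  rintro ⟨b1, b2, b3, b4, -⟩
  omega

theorem foldl_add_nb (w h_ : Int) (houses : List (List Int)) (l : List (Int × Int)) :
    l.foldl (fun acc c => acc + nbHousesB w h_ houses c) 0 =
      (l.map (nbP w h_ houses)).sum := by
  rw [show (fun (acc : Int) (c : Int × Int) => acc + nbHousesB w h_ houses c) =
      (fun acc c => acc + nbP w h_ houses c) from
    funext fun acc => funext fun c => by rw [nbHousesB_eq_nbP],
    PySem.List.foldl_add]
  ring

-- ===== VERDICT (by name: the statement is the Claim_ definition above) =====
theorem solution_spec : Claim_equal_solution := by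
  intro w h_ houses _ _
  show solution w h_ houses = solution_alt w h_ houses
  have hstart : PySem.Set.add PySem.Set.empty ((0, 0) : Int × Int) = [(0, 0)] := rfl
  obtain ⟨ext, a1, a2, a3⟩ := loopA_spec w h_ houses (h_.toNat * w.toNat + 2)
    [] [(0, 0)] 0 (PySem.Set.add PySem.Set.empty (0, 0))
    (by simp)
    (by intro z; rw [hstart]; simp)
    (by intro z hz; rw [show z = ((0, 0) : Int × Int) by simpa using hz]; exact ReachP.base)
    (by intro p hp; exact absurd hp (List.not_mem_nil))
    (by simp)
    (by have := card_rectO w h_; simp only [List.length_nil]; omega)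
  obtain ⟨b1, b2⟩ := loopB_spec w h_ houses (h_.toNat * w.toNat + 2)
    (PySem.Set.add PySem.Set.empty (0, 0))
    (by
      rw [hstart]
      refine ⟨by simp, ?_, by simp⟩
      intro z hz
      rw [show z = ((0, 0) : Int × Int) by simpa using hz]
      exact ReachP.base)
    (by have := card_rectO w h_; rw [hstart]; simp only [List.length_singleton]; omega)
  have hperm : ([((0 : Int), (0 : Int))] ++ ext).Perm
      (loopB w h_ houses (h_.toNat * w.toNat + 2) (PySem.Set.add PySem.Set.empty (0, 0))) := by
    refine (List.perm_ext_iff_of_nodup (by simpa using a2) b1).mpr ?_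
    intro z
    rw [b2 z]
    have := a3 z
    simpa using this
  unfold solution solution_alt
  by_cases hdeg : h_ ≤ 0 ∨ w ≤ 0
  · rw [if_pos hdeg, a1, zero_add]
    refine List.sum_eq_zero ?_
    intro x hx
    obtain ⟨c, -, he⟩ := List.mem_map.mp hx
    rw [← he, nbP_degenerate w h_ houses c hdeg]
  · rw [if_neg hdeg, a1, foldl_add_nb, zero_add]
    exact (hperm.map (nbP w h_ houses)).sum_eq
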